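-- pv_equiv track=rewrite | github.com/spacedlevo/prediction_league_scripts | scripts/analysis/verify_predictions_from_messages.py | extract_teams_from_line
-- ===== SOURCE A (Python) =====
-- def extract_teams_from_line(line, teams):
--     """Extract team names from line based on their position in the text"""
--     team_positions = []
--
--     for team in teams:
--         if team in line:
--             pos = line.find(team)
--             team_positions.append((pos, team))
--
--     # Sort by position in text (earliest first)
--     team_positions.sort(key=lambda x: x[0])
--
--     # Return teams in order they appear in text
--     return [team for pos, team in team_positions]
-- ===== SOURCE B (Python) =====
-- def extract_teams_from_line(line, teams):
--     """Extract team names from line based on their position in the text"""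
--     # Counting sort by first-occurrence position instead of a comparison sort:
--     # bucket index p+1 holds the teams first found at position p (bucket 0
--     # collects the absent teams, find() == -1, and is skipped at the end).
--     buckets = [[] for _ in range(len(line) + 2)]
--     for t in teams:
--         buckets[line.find(t) + 1].append(t)
--     out = []
--     for b in buckets[1:]:
--         out += b
--     return out
-- ===== Notes on version B (the rewrite author's own statement) =====
-- stated objective: alternative
-- what changed: Replaces the collect-(pos,team)-pairs-then-stable-sort algorithm by a counting sort: a bucket list indexed by first-occurrence position (bucket 0 = absent teams) filled in one pass over teams, then concatenated skipping bucket 0 — no comparison sort and no intermediate pair list.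
import Mathlib
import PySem

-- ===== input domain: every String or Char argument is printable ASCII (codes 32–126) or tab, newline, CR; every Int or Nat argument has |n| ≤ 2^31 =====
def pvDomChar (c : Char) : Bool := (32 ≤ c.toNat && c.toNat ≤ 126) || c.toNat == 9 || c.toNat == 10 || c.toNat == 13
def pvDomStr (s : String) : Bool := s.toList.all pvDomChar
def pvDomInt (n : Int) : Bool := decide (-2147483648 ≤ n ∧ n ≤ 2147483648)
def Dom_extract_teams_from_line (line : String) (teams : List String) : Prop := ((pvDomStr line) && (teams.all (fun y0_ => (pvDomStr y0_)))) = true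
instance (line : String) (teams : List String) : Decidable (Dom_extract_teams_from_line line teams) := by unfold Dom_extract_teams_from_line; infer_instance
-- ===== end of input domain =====

-- B replaces A's collect-pairs-then-stable-sort with a counting sort: one bucket per line position, filled by a single pass over teams; same return value, no side effects.

-- ===== PORT A =====
def extract_teams_from_line (line : String) (teams : List String) : List String :=
  let team_positions : List (Int × String) :=
    teams.foldl (fun acc team =>
      if PySem.Str.isIn team line then acc ++ [(PySem.Str.find line team, team)] else acc) []
  let sorted_positions := PySem.List.sorted team_positions (fun x => x.1)
  sorted_positions.map (fun x => x.2)

-- ===== PORT B =====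
-- buckets[line.find(t) + 1].append(t): the index find+1 is always ≥ 0 and < len(line)+2,
-- so Python's indexing is plain non-negative indexing and .toNat is exact here
def extract_teams_from_line_alt (line : String) (teams : List String) : List String :=
  let buckets0 : List (List String) :=
    (PySem.List.pyRange 0 (PySem.Str.len line + 2)).map (fun _ => ([] : List String))
  let buckets := teams.foldl
    (fun bs t => bs.modify (PySem.Str.find line t + 1).toNat (fun b => b ++ [t])) buckets0
  (PySem.List.slice buckets (some 1)).foldl (fun out b => out ++ b) []

-- ===== PRECONDITION & SPEC =====
def Spec_extract_teams_from_line (line : String) (teams : List String) (out : List String) : Prop := out = extract_teams_from_line_alt line teams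
instance (line : String) (teams : List String) (out : List String) : Decidable (Spec_extract_teams_from_line line teams out) := by unfold Spec_extract_teams_from_line; infer_instance

-- ===== CLAIM (what is proved, stated in full; the proofs are below) =====
def Claim_equal_extract_teams_from_line : Prop := ∀ (line : String) (teams : List String), Dom_extract_teams_from_line line teams → Spec_extract_teams_from_line line teams (extract_teams_from_line line teams)

-- ===== LEMMAS AND PROOFS =====

-- str.find returns -1 or an index between the start offset and the end of the string
theorem find_go_bound (sub : List Char) : ∀ (s : List Char) (k : Nat),
    PySem.Chars.find.go sub s k = -1 ∨
      ((k : Int) ≤ PySem.Chars.find.go sub s k ∧ PySem.Chars.find.go sub s k ≤ (k : Int) + s.length) := by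
  intro s
  induction s with
  | nil =>
    intro k
    simp only [PySem.Chars.find.go]
    split <;> simp
  | cons c t ih =>
    intro k
    simp only [PySem.Chars.find.go]
    split
    · right
      simp only [List.length_cons]
      constructor <;> push_cast <;> omega
    · rcases ih (k + 1) with h | ⟨h1, h2⟩
      · left; exact h
      · right
        simp only [List.length_cons] at *
        constructor <;> push_cast at * <;> omega

theorem find_bound (line t : String) :
    PySem.Str.find line t = -1 ∨
      (0 ≤ PySem.Str.find line t ∧ PySem.Str.find line t ≤ (line.toList.length : Int)) := by
  have := find_go_bound t.toList line.toList 0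
  simpa [PySem.Str.find, PySem.Chars.find] using this

theorem insertBy_append_not {α : Type} (before : α → α → Bool) (x : α) (as bs : List α)
    (h : ∀ a ∈ as, before x a = false) :
    PySem.List.insertBy before x (as ++ bs) = as ++ PySem.List.insertBy before x bs := by
  induction as with
  | nil => rfl
  | cons a as ih =>
    simp only [List.cons_append, PySem.List.insertBy, h a (List.mem_cons_self),
      Bool.false_eq_true, if_false]
    rw [ih (fun a ha => h a (List.mem_cons_of_mem _ ha))]

theorem insertBy_all_before {α : Type} (before : α → α → Bool) (x : α) (bs : List α)
    (h : ∀ b ∈ bs, before x b = true) :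
    PySem.List.insertBy before x bs = x :: bs := by
  cases bs with
  | nil => rfl
  | cons b t => simp [PySem.List.insertBy, h b List.mem_cons_self]

theorem flatMap_congr_mem {α β : Type} (l : List α) (f g : α → List β)
    (h : ∀ a ∈ l, f a = g a) : l.flatMap f = l.flatMap g := by
  induction l with
  | nil => rfl
  | cons a t ih =>
    simp only [List.flatMap_cons, h a List.mem_cons_self,
      ih (fun a ha => h a (List.mem_cons_of_mem _ ha))]

-- inserting an element whose key lies in the strictly increasing key list ks
-- appends it to the end of its bucket
theorem insert_flatMap (l : List (Int × String)) (x : Int × String) :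
    ∀ ks : List Int, ks.Pairwise (· < ·) → x.1 ∈ ks →
    PySem.List.insertBy (fun a b => decide (a.1 < b.1)) x
        (ks.flatMap (fun i => l.filter (fun p => p.1 == i)))
      = ks.flatMap (fun i => (l ++ [x]).filter (fun p => p.1 == i)) := by
  intro ks
  induction ks with
  | nil => intro _ hx; exact absurd hx (List.not_mem_nil)
  | cons k ks ih =>
    intro hpw hx
    have hk : ∀ j ∈ ks, k < j := (List.pairwise_cons.mp hpw).1
    have hpw' : ks.Pairwise (· < ·) := (List.pairwise_cons.mp hpw).2
    simp only [List.flatMap_cons]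
    by_cases hxk : x.1 = k
    · have hnot : ∀ a ∈ l.filter (fun p => p.1 == k), (fun a b => decide (a.1 < b.1)) x a = false := by
        intro a ha
        have : a.1 = k := by simpa using (List.mem_filter.mp ha).2
        simp [this, hxk]
      have hall : ∀ b ∈ ks.flatMap (fun i => l.filter (fun p => p.1 == i)),
          (fun a b => decide (a.1 < b.1)) x b = true := by
        intro b hb
        rcases List.mem_flatMap.mp hb with ⟨j, hj, hbj⟩
        have : b.1 = j := by simpa using (List.mem_filter.mp hbj).2
        have := hk j hj
        simp only [decide_eq_true_eq]
        omega
      rw [insertBy_append_not _ _ _ _ hnot, insertBy_all_before _ _ _ hall]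
      have hbk : (l ++ [x]).filter (fun p => p.1 == k) = l.filter (fun p => p.1 == k) ++ [x] := by
        simp [List.filter_append, hxk]
      rw [hbk]
      have hrest : ks.flatMap (fun i => (l ++ [x]).filter (fun p => p.1 == i))
          = ks.flatMap (fun i => l.filter (fun p => p.1 == i)) := by
        apply flatMap_congr_mem
        intro j hj
        have hne : x.1 ≠ j := by have := hk j hj; omega
        simp [List.filter_append, hne]
      rw [hrest]
      simp
    · have hx' : x.1 ∈ ks := by
        rcases List.mem_cons.mp hx with h | h
        · exact absurd h hxk
        · exact h
      have hkx : k < x.1 := hk _ hx'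
      have hnot : ∀ a ∈ l.filter (fun p => p.1 == k), (fun a b => decide (a.1 < b.1)) x a = false := by
        intro a ha
        have : a.1 = k := by simpa using (List.mem_filter.mp ha).2
        simp only [decide_eq_false_iff_not, not_lt, this]
        omega
      rw [insertBy_append_not _ _ _ _ hnot, ih hpw' hx']
      have hbk : (l ++ [x]).filter (fun p => p.1 == k) = l.filter (fun p => p.1 == k) := by
        simp [List.filter_append, hxk]
      rw [hbk]

theorem ks_pairwise (n : Nat) :
    (List.map (fun (k : Nat) => (k : Int)) (List.range (n + 1))).Pairwise (· < ·) := by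
  refine List.pairwise_map.mpr ?_
  exact List.pairwise_lt_range.imp (fun h => by exact_mod_cast h)

theorem ks_mem (n : Nat) (x : Int) (h0 : 0 ≤ x) (hn : x ≤ (n : Int)) :
    x ∈ List.map (fun (k : Nat) => (k : Int)) (List.range (n + 1)) := by
  refine List.mem_map.mpr ⟨x.toNat, List.mem_range.mpr (by omega), by omega⟩

-- a stable sort by key, with all keys in [0, n], is the concatenation of the buckets in key order
theorem sorted_buckets (n : Nat) (l : List (Int × String))
    (h : ∀ p ∈ l, 0 ≤ p.1 ∧ p.1 ≤ (n : Int)) :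
    PySem.List.sorted l (fun p => p.1)
      = (List.map (fun (k : Nat) => (k : Int)) (List.range (n + 1))).flatMap
          (fun i => l.filter (fun p => p.1 == i)) := by
  induction l using List.reverseRecOn with
  | nil => simp [PySem.List.sorted_eq_foldl_insertBy]
  | append_singleton l x ih =>
    have hl : ∀ p ∈ l, 0 ≤ p.1 ∧ p.1 ≤ (n : Int) := fun p hp => h p (List.mem_append_left _ hp)
    have hx := h x (List.mem_append_right _ List.mem_cons_self)
    rw [PySem.List.sorted_eq_foldl_insertBy, List.foldl_append, List.foldl_cons, List.foldl_nil,
      ← PySem.List.sorted_eq_foldl_insertBy, ih hl]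
    exact insert_flatMap l x _ (ks_pairwise n) (ks_mem n x.1 hx.1 hx.2)

theorem flatMap_of_map {α β γ : Type} (f : α → β) (g : β → List γ) (l : List α) :
    (l.map f).flatMap g = l.flatMap (fun a => g (f a)) := by
  induction l with
  | nil => rfl
  | cons a t ih => simp only [List.map_cons, List.flatMap_cons, ih]

theorem modify_map_range (m j : Nat) (g : Nat → List String) (f : List String → List String) :
    (List.map g (List.range m)).modify j f
      = List.map (fun i => if j = i then f (g i) else g i) (List.range m) := by
  apply List.ext_getElem
  · simp
  · intro p hp hp2
    simp [List.getElem_modify]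

-- after processing ts, bucket i holds exactly the ts whose index find+1 is i, in order
theorem fold_buckets (line : String) (ts : List String) :
    ts.foldl (fun bs t => bs.modify (PySem.Str.find line t + 1).toNat (fun b => b ++ [t]))
        ((List.range (line.toList.length + 2)).map (fun _ => ([] : List String)))
      = (List.range (line.toList.length + 2)).map
          (fun i => ts.filter (fun t => (PySem.Str.find line t + 1).toNat == i)) := by
  induction ts using List.reverseRecOn with
  | nil => simp
  | append_singleton ts t ih =>
    rw [List.foldl_append, List.foldl_cons, List.foldl_nil, ih, modify_map_range]
    apply List.map_congr_left
    intro i _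
    rw [List.filter_append]
    by_cases h : (PySem.Str.find line t + 1).toNat = i
    · have h' : (PySem.Chars.find line.toList t.toList + 1).toNat = i := h
      simp [h']
    · have h' : ¬(PySem.Chars.find line.toList t.toList + 1).toNat = i := h
      simp [h']

-- isIn is find ≠ -1 with the arguments of find, stated on String
theorem isIn_eq_find' (t line : String) :
    PySem.Str.isIn t line = (PySem.Str.find line t != -1) := rfl

-- ===== VERDICT (by name: the statement is the Claim_ definition above) =====
theorem extract_teams_from_line_spec : Claim_equal_extract_teams_from_line := by
  intro line teams _
  unfold Spec_extract_teams_from_line extract_teams_from_line extract_teams_from_line_alt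
  simp only
  -- B side: the bucket array is a map over range, its tail concatenation a flatMap
  have hm : PySem.Str.len line + 2 = ((line.toList.length + 2 : Nat) : Int) := by
    rw [PySem.Str.len_eq]; push_cast; ring
  rw [hm, PySem.List.pyRange_zero_natCast, List.map_map]
  have hconst : ((fun _ => ([] : List String)) ∘ fun (k : Nat) => (k : Int)) = fun _ => ([] : List String) := rfl
  rw [hconst, fold_buckets line teams]
  rw [PySem.List.slice_from _ (by omega : (0:Int) ≤ 1)]
  have h2 : line.toList.length + 2 = (line.toList.length + 1) + 1 := rfl
  rw [h2, List.range_succ_eq_map, List.map_cons, Int.toNat_one, List.drop_one, List.tail_cons, List.map_map,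
    PySem.List.foldl_append_eq_flatten, List.nil_append, ← List.flatMap_def]
  -- A side: the append loop is a filter+map
  rw [PySem.List.foldl_append_if (p := fun team => PySem.Str.isIn team line)
      (f := fun team => (PySem.Str.find line team, team))]
  rw [List.nil_append]
  -- keys of the pair list lie in [0, len(line)]
  have hkeys : ∀ p ∈ (teams.filter (fun t => PySem.Str.isIn t line)).map
      (fun t => (PySem.Str.find line t, t)), 0 ≤ p.1 ∧ p.1 ≤ (line.toList.length : Int) := by
    intro p hp
    rcases List.mem_map.mp hp with ⟨t, ht, rfl⟩
    have hin : PySem.Str.isIn t line = true := (List.mem_filter.mp ht).2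
    rcases find_bound line t with h | h
    · rw [isIn_eq_find'] at hin
      simp at hin
      exact absurd (show PySem.Chars.find line.toList t.toList = -1 from h) hin
    · exact h
  rw [sorted_buckets line.toList.length _ hkeys, List.map_flatMap, flatMap_of_map]
  apply flatMap_congr_mem
  intro k _
  -- one bucket: the pairs with key k, projected, are the teams in bucket k+1
  rw [List.filter_map, List.map_map]
  have hid : ((fun x : Int × String => x.2) ∘ fun t => (PySem.Str.find line t, t)) = id := rfl
  rw [hid, List.map_id, List.filter_filter]
  apply List.filter_congr
  intro t _
  rw [Bool.eq_iff_iff]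
  simp only [Function.comp, isIn_eq_find', Bool.and_eq_true, beq_iff_eq, bne_iff_ne, ne_eq]
  rcases find_bound line t with h | ⟨h0, h1⟩ <;> constructor <;> intro hh <;> omega
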